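-- pv_equiv track=rewrite | github.com/balanikaran/GCFL_Immersion_GLAU | 20-June-2019/Horoscope_AMT3.py | check
-- ===== SOURCE A (Python) =====
-- def check(s):
--     ch1 = 0
--     ch2 = 0
--     for ch in s:
--         if ch == 'A':
--             ch1 = ch1 + 1
--         elif ch == 'B':
--             ch2 = ch2 + 1
--         else:
--             return "NO"
--
--     if(ch1 == ch2):
--         return "YES"
--
--     return "NO"
-- ===== SOURCE B (Python) =====
-- def check(s):
--     n = len(s)
--     if n % 2:
--         return "NO"
--     h = n // 2
--     return "YES" if sorted(s) == ["A"] * h + ["B"] * h else "NO"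
-- ===== Notes on version B (the rewrite author's own statement) =====
-- stated objective: alternative
-- what changed: Instead of counting characters, B sorts the string after an odd-length early reject and compares the sorted list to the canonical form of h copies of letter A followed by h copies of letter B, where h is half the length.
import Mathlib
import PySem

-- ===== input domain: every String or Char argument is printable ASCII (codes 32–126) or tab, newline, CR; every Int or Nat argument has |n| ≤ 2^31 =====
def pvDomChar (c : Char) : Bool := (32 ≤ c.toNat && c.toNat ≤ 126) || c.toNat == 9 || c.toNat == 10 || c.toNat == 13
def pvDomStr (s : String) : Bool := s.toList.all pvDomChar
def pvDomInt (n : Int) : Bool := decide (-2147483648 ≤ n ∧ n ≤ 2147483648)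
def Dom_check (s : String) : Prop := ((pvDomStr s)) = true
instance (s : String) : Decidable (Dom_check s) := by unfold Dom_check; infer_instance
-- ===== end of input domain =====

-- B replaces A's counting loop with early exit by sort-and-compare against the canonical form "A"*h + "B"*h; same outputs.

-- ===== PORT A =====
-- A's loop: counters ch1/ch2, early return "NO" on any non-A/B character.
def checkGo : List Char → Int → Int → String
  | [], ch1, ch2 => if ch1 == ch2 then "YES" else "NO"
  | ch :: rest, ch1, ch2 =>
      if ch == 'A' then checkGo rest (ch1 + 1) ch2
      else if ch == 'B' then checkGo rest ch1 (ch2 + 1)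
      else "NO"

def check (s : String) : String := checkGo s.toList 0 0

-- ===== PORT B =====
def check_alt (s : String) : String :=
  let n := s.toList.length
  if n % 2 ≠ 0 then "NO"
  else
    let h := n / 2
    if PySem.List.sorted s.toList (fun c => c) false ==
       List.replicate h 'A' ++ List.replicate h 'B' then "YES" else "NO"

-- ===== PRECONDITION & SPEC =====
def Spec_check (s : String) (out : String) : Prop := out = check_alt s
instance (s : String) (out : String) : Decidable (Spec_check s out) := by unfold Spec_check; infer_instance

-- ===== CLAIM (what is proved, stated in full; the proofs are below) =====
def Claim_equal_check : Prop := ∀ (s : String), Dom_check s → Spec_check s (check s)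

-- ===== LEMMAS AND PROOFS =====

theorem countAB_le_length (l : List Char) : l.count 'A' + l.count 'B' ≤ l.length := by
  induction l with
  | nil => simp
  | cons c rest ih =>
      simp only [List.count_cons, List.length_cons]
      split_ifs <;> simp_all <;> omega

theorem checkGo_eq (l : List Char) : ∀ (ch1 ch2 : Int),
    checkGo l ch1 ch2 =
      if ch1 + (l.count 'A' : Int) = ch2 + (l.count 'B' : Int) ∧
         l.count 'A' + l.count 'B' = l.length then "YES" else "NO" := by
  induction l with
  | nil => intro ch1 ch2; simp [checkGo]
  | cons c rest ih =>
      intro ch1 ch2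
      by_cases hA : c = 'A'
      · subst hA
        simp only [checkGo, beq_self_eq_true, if_true, ih, List.count_cons,
          List.length_cons, show ('A' == 'B') = false from rfl,
          Bool.false_eq_true, if_false]
        refine if_congr ?_ rfl rfl
        push_cast
        constructor <;> rintro ⟨h1, h2⟩ <;> exact ⟨by omega, by omega⟩
      · by_cases hB : c = 'B'
        · subst hB
          simp only [checkGo, beq_self_eq_true, if_true, ih, List.count_cons,
            List.length_cons, show ('B' == 'A') = false from rfl,
            Bool.false_eq_true, if_false]
          refine if_congr ?_ rfl rfl
          push_cast
          constructor <;> rintro ⟨h1, h2⟩ <;> exact ⟨by omega, by omega⟩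
        · have h1 : (c == 'A') = false := by simp [hA]
          have h2 : (c == 'B') = false := by simp [hB]
          simp only [checkGo, h1, h2, Bool.false_eq_true, if_false,
            List.count_cons, List.length_cons]
          have hle := countAB_le_length rest
          rw [if_neg]
          rintro ⟨-, hlen⟩
          omega

theorem mem_of_countAB (l : List Char) (h : l.count 'A' + l.count 'B' = l.length) :
    ∀ c ∈ l, c = 'A' ∨ c = 'B' := by
  induction l with
  | nil => simp
  | cons c rest ih =>
      intro x hx
      by_cases hA : c = 'A'
      · subst hA
        simp only [List.count_cons, List.length_cons,
          show ('A' == 'B') = false from rfl] at h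
        rcases List.mem_cons.mp hx with hx | hx
        · left; exact hx
        · exact ih (by simp at h; omega) x hx
      · by_cases hB : c = 'B'
        · subst hB
          simp only [List.count_cons, List.length_cons,
            show ('B' == 'A') = false from rfl] at h
          rcases List.mem_cons.mp hx with hx | hx
          · right; exact hx
          · exact ih (by simp at h; omega) x hx
        · exfalso
          have hle := countAB_le_length rest
          simp only [List.count_cons, List.length_cons] at h
          have h1 : (c == 'A') = false := by simp [hA]
          have h2 : (c == 'B') = false := by simp [hB]
          rw [h1, h2] at h
          simp at h
          omega

theorem sorted_canonical (l : List Char) (h : ℕ)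
    (hA : l.count 'A' = h) (hB : l.count 'B' = h) (hlen : l.length = 2 * h) :
    PySem.List.sorted l (fun c => c) false =
      List.replicate h 'A' ++ List.replicate h 'B' := by
  apply PySem.List.sorted_id_eq_of_perm_of_pairwise
  · apply List.perm_iff_count.mpr
    intro c
    rw [List.count_append, List.count_replicate, List.count_replicate]
    by_cases hcA : c = 'A'
    · subst hcA; simpa using hA.symm
    · by_cases hcB : c = 'B'
      · subst hcB; simpa using hB.symm
      · have hnm : c ∉ l := fun hmem => by
          rcases mem_of_countAB l (by omega) c hmem with h' | h' <;> simp_all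
        rw [List.count_eq_zero.mpr hnm,
          if_neg (fun h' : ('A' == c) = true => hcA (beq_iff_eq.mp h').symm),
          if_neg (fun h' : ('B' == c) = true => hcB (beq_iff_eq.mp h').symm)]
  · rw [List.pairwise_append]
    refine ⟨List.pairwise_replicate.mpr ?_, List.pairwise_replicate.mpr ?_, ?_⟩
    · exact Or.inr (le_refl _)
    · exact Or.inr (le_refl _)
    · intro a ha b hb
      rw [List.eq_of_mem_replicate ha, List.eq_of_mem_replicate hb]
      decide

-- ===== VERDICT (by name: the statement is the Claim_ definition above) =====
theorem check_spec : Claim_equal_check := by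
  intro s _
  unfold Spec_check check check_alt
  rw [checkGo_eq]
  set l := s.toList with hl
  simp only [zero_add]
  by_cases hc : (l.count 'A' : Int) = (l.count 'B' : Int) ∧ l.count 'A' + l.count 'B' = l.length
  · rw [if_pos hc]
    obtain ⟨h1, h2⟩ := hc
    have h1' : l.count 'A' = l.count 'B' := by exact_mod_cast h1
    have hlen : l.length = 2 * l.count 'A' := by omega
    have hmod : l.length % 2 = 0 := by omega
    have hdiv : l.length / 2 = l.count 'A' := by omega
    rw [if_neg (by omega)]
    rw [hdiv, sorted_canonical l (l.count 'A') rfl (by omega) hlen]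
    simp
  · rw [if_neg hc]
    by_cases hm : l.length % 2 ≠ 0
    · rw [if_pos hm]
    · rw [if_neg hm]
      rw [not_not] at hm
      rw [if_neg]
      intro hbeq
      rw [beq_iff_eq] at hbeq
      have hperm : l.Perm (List.replicate (l.length / 2) 'A' ++ List.replicate (l.length / 2) 'B') := by
        calc l.Perm (PySem.List.sorted l (fun c => c) false) := (PySem.List.sorted_perm l _ false).symm
          _ = _ := hbeq
      have hA : l.count 'A' = l.length / 2 := by
        rw [hperm.count_eq]; simp [List.count_replicate, List.count_append]
      have hB : l.count 'B' = l.length / 2 := by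
        rw [hperm.count_eq]; simp [List.count_replicate, List.count_append]
      exact hc ⟨by rw [hA, hB], by omega⟩
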